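-- pv_equiv track=rewrite | github.com/Jaesang98/CodingTest | Programmers/Python3/algorithm/bruteForce.py | solution
-- ===== SOURCE A (Python) =====
-- def solution(answers):
--     answer_dict = {"one" : 0, "two" : 0, "three" : 0,}
--     max_value = 0
--     answer = []
--
--     one = [1,2,3,4,5]
--     two = [2,1,2,3,2,4,2,5]
--     three = [3,3,1,1,2,2,4,4,5,5]
--
--     for i in range(len(answers)) :
--         if one[i % len(one)] == answers[i] :
--             answer_dict["one"] += 1
--
--         if two[i % len(two)] == answers[i] :
--             answer_dict["two"] += 1
--
--         if three[i % len(three)] == answers[i] :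
--             answer_dict["three"] += 1
--
--     max_value = max(answer_dict.values())
--     for key in answer_dict :
--         if answer_dict[key] == max_value :
--             if key == "one" :
--                 answer.append(1)
--             elif key == "two" :
--                 answer.append(2)
--             else :
--                 answer.append(3)
--
--     return answer
-- ===== SOURCE B (Python) =====
-- def solution(answers):
--     pats = [[1, 2, 3, 4, 5],
--             [2, 1, 2, 3, 2, 4, 2, 5],
--             [3, 3, 1, 1, 2, 2, 4, 4, 5, 5]]
--     # Histogram of (position mod 40, value) pairs; 40 = lcm of the pattern lengths,
--     # so each pattern's score is 40 lookups, never rescanning answers.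
--     freq = {}
--     for i, a in enumerate(answers):
--         k = (i % 40, a)
--         freq[k] = freq.get(k, 0) + 1
--     scores = [sum(freq.get((r, p[r % len(p)]), 0) for r in range(40)) for p in pats]
--     best = max(scores)
--     return [i + 1 for i in range(3) if scores[i] == best]
-- ===== Notes on version B (the rewrite author's own statement) =====
-- stated objective: alternative
-- what changed: Instead of comparing every answer against the three patterns, B builds a histogram of (position mod 40, value) pairs in one pass (40 = lcm of the pattern lengths) and computes each pattern's score as 40 histogram lookups, then selects maximal indices over range(3); A's string-keyed dict and fused three-if loop disappear.
import Mathlib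
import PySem

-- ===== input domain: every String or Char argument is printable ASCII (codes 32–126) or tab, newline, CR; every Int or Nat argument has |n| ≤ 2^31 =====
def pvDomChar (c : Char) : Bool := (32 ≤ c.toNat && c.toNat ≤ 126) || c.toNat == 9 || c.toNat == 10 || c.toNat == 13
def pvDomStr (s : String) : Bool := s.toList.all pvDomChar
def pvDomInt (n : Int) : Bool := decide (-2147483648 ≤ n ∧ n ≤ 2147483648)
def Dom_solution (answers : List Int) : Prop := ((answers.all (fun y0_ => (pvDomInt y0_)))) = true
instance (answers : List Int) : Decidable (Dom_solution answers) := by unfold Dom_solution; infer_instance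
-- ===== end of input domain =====

-- B replaces A's fused per-answer comparison loop + string-keyed dict by a
-- (position mod 40, value) histogram with 40 lookups per pattern (objective: alternative).

-- ===== PORT A =====
-- body of A's fused for-loop (the three ifs), named so the invariant can speak about it
def pvStepA (answers : List Int) (d : PySem.Dict String Int) (i : Int) : PySem.Dict String Int :=
  let one : List Int := [1,2,3,4,5]
  let two : List Int := [2,1,2,3,2,4,2,5]
  let three : List Int := [3,3,1,1,2,2,4,4,5,5]
  let d := if PySem.List.pyGetD one (PySem.Int.mod i (PySem.List.len one)) 0
              = PySem.List.pyGetD answers i 0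
           then d.modify "one" 0 (· + 1) else d
  let d := if PySem.List.pyGetD two (PySem.Int.mod i (PySem.List.len two)) 0
              = PySem.List.pyGetD answers i 0
           then d.modify "two" 0 (· + 1) else d
  if PySem.List.pyGetD three (PySem.Int.mod i (PySem.List.len three)) 0
              = PySem.List.pyGetD answers i 0
           then d.modify "three" 0 (· + 1) else d

def solution (answers : List Int) : List Int :=
  let answer_dict : PySem.Dict String Int :=
    PySem.Dict.ofList [("one", 0), ("two", 0), ("three", 0)]
  let d := (PySem.List.pyRange 0 (PySem.List.len answers) 1).foldl (pvStepA answers) answer_dict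
  let max_value := (PySem.List.max? (PySem.Dict.values d) (fun v => v)).getD 0
  (PySem.Dict.keys d).foldl (fun answer key =>
    if PySem.Dict.getD d key 0 = max_value then
      if key = "one" then answer ++ [1]
      else if key = "two" then answer ++ [2]
      else answer ++ [3]
    else answer) []

-- ===== PORT B =====
-- key of the histogram: (i % 40, answer value)
def pvKey (q : Int × Int) : Int × Int := (PySem.Int.mod q.1 40, q.2)

def solution_alt (answers : List Int) : List Int :=
  let pats : List (List Int) :=
    [[1,2,3,4,5], [2,1,2,3,2,4,2,5], [3,3,1,1,2,2,4,4,5,5]]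
  -- freq[k] = freq.get(k, 0) + 1 over enumerate(answers)
  let freq := (PySem.List.enumerate answers 0).foldl
    (fun d q => d.insert (pvKey q) (d.getD (pvKey q) 0 + 1))
    (PySem.Dict.empty : PySem.Dict (Int × Int) Int)
  -- sum(freq.get((r, p[r % len(p)]), 0) for r in range(40))
  let scores := pats.map (fun p =>
    ((PySem.List.pyRange 0 40 1).map (fun r =>
      freq.getD (r, PySem.List.pyGetD p (PySem.Int.mod r (PySem.List.len p)) 0) 0)).sum)
  let best := (PySem.List.max? scores (fun v => v)).getD 0
  (PySem.List.pyRange 0 3 1).filterMap (fun i =>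
    if PySem.List.pyGetD scores i 0 = best then some (i + 1) else none)

-- ===== PRECONDITION & SPEC =====
def Spec_solution (answers : List Int) (out : List Int) : Prop := out = solution_alt answers
instance (answers : List Int) (out : List Int) : Decidable (Spec_solution answers out) := by unfold Spec_solution; infer_instance

-- ===== CLAIM (what is proved, stated in full; the proofs are below) =====
def Claim_equal_solution : Prop := ∀ (answers : List Int), Dom_solution answers → Spec_solution answers (solution answers)

-- ===== LEMMAS AND PROOFS =====

-- absolute-index match count for pattern p starting at absolute index k
def pvCnt (p : List Int) : Nat → List Int → Int
  | _, [] => 0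
  | k, a :: rest => (if p.getD (k % p.length) 0 = a then 1 else 0) + pvCnt p (k+1) rest

theorem mod5 (j : Nat) : PySem.Int.mod (j : Int) 5 = ((j % 5 : Nat) : Int) := by
  exact_mod_cast PySem.Int.mod_natCast j 5
theorem mod8 (j : Nat) : PySem.Int.mod (j : Int) 8 = ((j % 8 : Nat) : Int) := by
  exact_mod_cast PySem.Int.mod_natCast j 8
theorem mod10 (j : Nat) : PySem.Int.mod (j : Int) 10 = ((j % 10 : Nat) : Int) := by
  exact_mod_cast PySem.Int.mod_natCast j 10
theorem mod40 (j : Nat) : PySem.Int.mod (j : Int) 40 = ((j % 40 : Nat) : Int) := by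
  exact_mod_cast PySem.Int.mod_natCast j 40

-- one step of A's fused loop on the canonical three-key dict state
theorem stepA (answers : List Int) (j : Nat) (c1 c2 c3 : Int) :
    pvStepA answers (PySem.Dict.ofList [("one", c1), ("two", c2), ("three", c3)]) (j : Int)
    = PySem.Dict.ofList
        [("one", c1 + (if ([1,2,3,4,5] : List Int).getD (j % 5) 0 = answers.getD j 0 then 1 else 0)),
         ("two", c2 + (if ([2,1,2,3,2,4,2,5] : List Int).getD (j % 8) 0 = answers.getD j 0 then 1 else 0)),
         ("three", c3 + (if ([3,3,1,1,2,2,4,4,5,5] : List Int).getD (j % 10) 0 = answers.getD j 0 then 1 else 0))] := by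
  simp only [pvStepA, PySem.List.len_eq, List.length_cons, List.length_nil,
    Nat.reduceAdd, Nat.cast_ofNat]
  simp only [mod5 j, mod8 j, mod10 j, PySem.List.pyGetD_natCast]
  split_ifs
  all_goals try simp only [add_zero]
  all_goals rfl

-- the loop invariant for A's fused loop, over range' j m
theorem loopA (answers : List Int) :
    ∀ (m j : Nat) (c1 c2 c3 : Int), j + m = answers.length →
    ((List.range' j m).map (fun (k : Nat) => (k : Int))).foldl (pvStepA answers)
      (PySem.Dict.ofList [("one", c1), ("two", c2), ("three", c3)])
    = PySem.Dict.ofList [("one", c1 + pvCnt [1,2,3,4,5] j (answers.drop j)),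
        ("two", c2 + pvCnt [2,1,2,3,2,4,2,5] j (answers.drop j)),
        ("three", c3 + pvCnt [3,3,1,1,2,2,4,4,5,5] j (answers.drop j))] := by
  intro m
  induction m with
  | zero =>
    intro j c1 c2 c3 hj
    rw [List.drop_of_length_le (by omega)]
    simp [pvCnt]
  | succ m ih =>
    intro j c1 c2 c3 hj
    have hjlt : j < answers.length := by omega
    rw [List.range'_succ, List.map_cons, List.foldl_cons, stepA answers j c1 c2 c3,
        ih (j+1) _ _ _ (by omega)]
    have hdrop : answers.drop j = answers[j] :: answers.drop (j+1) :=
      List.drop_eq_getElem_cons hjlt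
    have hgetD : answers.getD j 0 = answers[j] := List.getD_eq_getElem answers 0 hjlt
    rw [hdrop]
    simp only [pvCnt, hgetD, List.length_cons, List.length_nil]
    apply congrArg
    simp only [List.cons.injEq, Prod.mk.injEq, and_true, true_and]
    refine ⟨by ring_nf, by ring_nf, by ring_nf⟩

-- B's histogram lookup is a pair count over the key-mapped enumeration
theorem freq_getD (answers : List Int) (k : Int × Int) :
    ((PySem.List.enumerate answers 0).foldl
      (fun d q => d.insert (pvKey q) (d.getD (pvKey q) 0 + 1))
      (PySem.Dict.empty : PySem.Dict (Int × Int) Int)).getD k 0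
    = (((PySem.List.enumerate answers 0).map pvKey).count k : Int) := by
  rw [← List.foldl_map (f := pvKey)
    (g := fun (d : PySem.Dict (Int × Int) Int) x => d.insert x (d.getD x 0 + 1))]
  rw [PySem.Dict.getD_foldl_insert_add_one]
  simp [PySem.Dict.getD, PySem.Dict.get?, PySem.Dict.empty]

-- indicator sum over a duplicate-free residue list
theorem indicator_sum (f : Int → Int) :
    ∀ (rs : List Int) (q : Int × Int), rs.Nodup → q.1 ∈ rs →
    ((rs.map (fun r => if ((r, f r) : Int × Int) = q then (1 : Int) else 0)).sum)
    = if q.2 = f q.1 then 1 else 0 := by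
  intro rs
  induction rs with
  | nil => intro q _ h; cases h
  | cons r rest ih =>
    intro q hnd hmem
    simp only [List.map_cons, List.sum_cons]
    by_cases hr : q.1 = r
    · subst hr
      have hzero : (rest.map (fun r' => if ((r', f r') : Int × Int) = q then (1 : Int) else 0)).sum = 0 := by
        apply List.sum_eq_zero
        intro x hx
        rcases List.mem_map.mp hx with ⟨r', hr', rfl⟩
        have hne : r' ≠ q.1 := fun h => (List.nodup_cons.mp hnd).1 (h ▸ hr')
        simp only [Prod.ext_iff, ite_eq_right_iff, and_imp]
        exact fun h _ => absurd h hne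
      rw [hzero, add_zero]
      rcases q with ⟨q1, q2⟩
      simp [Prod.ext_iff, eq_comm]
    · have hmem' : q.1 ∈ rest := by
        rcases List.mem_cons.mp hmem with h | h
        · exact absurd h hr
        · exact h
      rw [ih q (List.nodup_cons.mp hnd).2 hmem']
      have hne : ((r, f r) : Int × Int) ≠ q := fun h => hr (by simpa using congrArg Prod.fst h.symm)
      simp [hne]

-- sum of per-residue counts = one countP, when every key lands in the residue list
theorem sum_count_eq_countP (f : Int → Int) (rs : List Int) (hnd : rs.Nodup) :
    ∀ (L : List (Int × Int)), (∀ q ∈ L, q.1 ∈ rs) →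
    ((rs.map (fun r => (L.count ((r, f r) : Int × Int) : Int))).sum)
    = (L.countP (fun q => decide (q.2 = f q.1)) : Int) := by
  intro L
  induction L with
  | nil => intro _; simp
  | cons q L ih =>
    intro hall
    have hL : ∀ q' ∈ L, q'.1 ∈ rs := fun q' h => hall q' (List.mem_cons_of_mem _ h)
    have hmap : (rs.map (fun r => ((q :: L).count ((r, f r) : Int × Int) : Int)))
        = rs.map (fun r => (L.count ((r, f r) : Int × Int) : Int)
            + (if ((r, f r) : Int × Int) = q then (1 : Int) else 0)) := by
      apply List.map_congr_left
      intro r _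
      rw [List.count_cons]
      by_cases h : q = (r, f r)
      · simp [h]
      · have h' : ¬ ((r, f r) : Int × Int) = q := fun hh => h hh.symm
        simp [h, h']
    rw [hmap, PySem.List.sum_map_add_int, ih hL,
        indicator_sum f rs q hnd (hall q (List.mem_cons_self)), List.countP_cons]
    by_cases h : q.2 = f q.1 <;> simp [h]

-- B's per-pattern score equals the absolute-index match count, for a pattern of length dividing 40
theorem scoreB_eq_cnt (p : List Int) (hdvd : p.length ∣ 40) (answers : List Int) :
    (((PySem.List.pyRange 0 40 1).map (fun r =>
      (((PySem.List.enumerate answers 0).foldl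
        (fun d q => d.insert (pvKey q) (d.getD (pvKey q) 0 + 1))
        (PySem.Dict.empty : PySem.Dict (Int × Int) Int)).getD
          (r, PySem.List.pyGetD p (PySem.Int.mod r (PySem.List.len p)) 0) 0))).sum)
    = pvCnt p 0 answers := by
  simp only [freq_getD answers]
  have hnd : (PySem.List.pyRange 0 40 1).Nodup := by decide
  have hall : ∀ q ∈ (PySem.List.enumerate answers 0).map pvKey, q.1 ∈ PySem.List.pyRange 0 40 1 := by
    intro q hq
    rcases List.mem_map.mp hq with ⟨e, he, rfl⟩
    rcases (PySem.List.mem_enumerate_iff _ _ _).mp he with ⟨k, hk, rfl⟩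
    simp only [pvKey, zero_add, mod40 k]
    rw [PySem.List.mem_pyRange_one]
    have : k % 40 < 40 := Nat.mod_lt _ (by omega)
    omega
  rw [sum_count_eq_countP (fun r => PySem.List.pyGetD p (PySem.Int.mod r (PySem.List.len p)) 0) (PySem.List.pyRange 0 40 1) hnd _ hall]
  rw [List.countP_map]
  suffices h : ∀ (ans : List Int) (k : Nat),
      ((PySem.List.enumerate ans (k : Int)).countP
        (fun q => decide ((pvKey q).2 = PySem.List.pyGetD p (PySem.Int.mod (pvKey q).1 (PySem.List.len p)) 0)) : Int) = pvCnt p k ans by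
    have := h answers 0
    simpa using this
  intro ans
  induction ans with
  | nil => intro k; simp [PySem.List.enumerate_nil, pvCnt]
  | cons a rest ihr =>
    intro k
    rw [PySem.List.enumerate_cons, List.countP_cons]
    have hcast : ((k : Int) + 1) = ((k + 1 : Nat) : Int) := by push_cast; ring
    rw [hcast, pvCnt]
    have hcond : ((pvKey ((k : Int), a)).2 = PySem.List.pyGetD p (PySem.Int.mod (pvKey ((k : Int), a)).1 (PySem.List.len p)) 0)
        ↔ (p.getD (k % p.length) 0 = a) := by
      simp only [pvKey, mod40 k, PySem.List.len_eq]
      rw [show PySem.Int.mod ((k % 40 : Nat) : Int) (p.length : Int)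
            = ((k % 40 % p.length : Nat) : Int) from by
          exact_mod_cast PySem.Int.mod_natCast (k % 40) p.length]
      rw [Nat.mod_mod_of_dvd k hdvd, PySem.List.pyGetD_natCast]
      exact eq_comm
    by_cases h : p.getD (k % p.length) 0 = a
    · rw [if_pos h, decide_eq_true (hcond.mpr h)]
      simp only [reduceIte]
      push_cast
      rw [show ((k : Int) + 1) = ((k + 1 : Nat) : Int) from by push_cast; ring, ihr (k + 1)]
      ring
    · rw [if_neg h, decide_eq_false (fun hh => h (hcond.mp hh))]
      simp only [Bool.false_eq_true, reduceIte]
      push_cast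
      rw [show ((k : Int) + 1) = ((k + 1 : Nat) : Int) from by push_cast; ring, ihr (k + 1)]
      ring

-- selection: A's key-iteration vs B's range(3) filterMap, on the same three scores
theorem selEq (c1 c2 c3 m : Int) :
    (["one","two","three"].foldl (fun (answer : List Int) key =>
      if PySem.Dict.getD (PySem.Dict.ofList [("one", c1), ("two", c2), ("three", c3)]) key 0 = m then
        if key = "one" then answer ++ [1]
        else if key = "two" then answer ++ [2]
        else answer ++ [3]
      else answer) [])
    = (PySem.List.pyRange 0 3 1).filterMap (fun i =>
        if PySem.List.pyGetD ([c1,c2,c3] : List Int) i 0 = m then some (i + 1) else none) := by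
  have h1 : PySem.Dict.getD (PySem.Dict.ofList [("one", c1), ("two", c2), ("three", c3)]) "one" 0 = c1 := rfl
  have h2 : PySem.Dict.getD (PySem.Dict.ofList [("one", c1), ("two", c2), ("three", c3)]) "two" 0 = c2 := rfl
  have h3 : PySem.Dict.getD (PySem.Dict.ofList [("one", c1), ("two", c2), ("three", c3)]) "three" 0 = c3 := rfl
  have hr : PySem.List.pyRange 0 3 1 = [0, 1, 2] := by decide
  have g0 : PySem.List.pyGetD ([c1,c2,c3] : List Int) 0 0 = c1 := rfl
  have g1 : PySem.List.pyGetD ([c1,c2,c3] : List Int) 1 0 = c2 := rfl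
  have g2 : PySem.List.pyGetD ([c1,c2,c3] : List Int) 2 0 = c3 := rfl
  rw [hr]
  simp only [List.foldl_cons, List.foldl_nil, h1, h2, h3,
    List.filterMap_cons, List.filterMap_nil, g0, g1, g2]
  split_ifs <;> simp_all

-- ===== VERDICT (by name: the statement is the Claim_ definition above) =====
theorem solution_spec : Claim_equal_solution := by
  intro answers _
  unfold Spec_solution solution solution_alt
  rw [show PySem.List.len answers = (answers.length : Int) from PySem.List.len_eq answers]
  simp only [PySem.List.pyRange_zero_natCast, List.range_eq_range']
  rw [loopA answers answers.length 0 0 0 0 (by omega)]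
  simp only [List.drop_zero, zero_add, List.map_cons, List.map_nil]
  simp only [scoreB_eq_cnt [1,2,3,4,5] (by decide) answers,
      scoreB_eq_cnt [2,1,2,3,2,4,2,5] (by decide) answers,
      scoreB_eq_cnt [3,3,1,1,2,2,4,4,5,5] (by decide) answers]
  exact selEq _ _ _ _
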